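-- pv_equiv track=rewrite | github.com/ds4teams96/groundtruth | Backend/4_table_extraction.py | find_range
-- ===== SOURCE A (Python) =====
-- def find_range(lista,rango):
--     if len(lista)==0:
--         flat_list=[]
--     else:
--         for i in range(rango+1):
--             x=[list(range(x-i,x)) for x in lista]
--             flat_list = [item for sublist in x for item in sublist if item not in lista]
--     return(flat_list)
-- ===== SOURCE B (Python) =====
-- def find_range(lista, rango):
--     # Compute only the final loop iteration (i = rango) of A, with a set for O(1) membership.
--     presentes = set(lista)
--     return [y for x in lista for y in range(x - rango, x) if y not in presentes]
-- ===== Notes on version B (the rewrite author's own statement) =====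
-- stated objective: faster
-- what changed: B computes only the final loop iteration (i = rango) directly as a single flattened comprehension with a prebuilt set for membership, instead of A's loop that rebuilds and discards the whole result rango+1 times with list membership.
import Mathlib
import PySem

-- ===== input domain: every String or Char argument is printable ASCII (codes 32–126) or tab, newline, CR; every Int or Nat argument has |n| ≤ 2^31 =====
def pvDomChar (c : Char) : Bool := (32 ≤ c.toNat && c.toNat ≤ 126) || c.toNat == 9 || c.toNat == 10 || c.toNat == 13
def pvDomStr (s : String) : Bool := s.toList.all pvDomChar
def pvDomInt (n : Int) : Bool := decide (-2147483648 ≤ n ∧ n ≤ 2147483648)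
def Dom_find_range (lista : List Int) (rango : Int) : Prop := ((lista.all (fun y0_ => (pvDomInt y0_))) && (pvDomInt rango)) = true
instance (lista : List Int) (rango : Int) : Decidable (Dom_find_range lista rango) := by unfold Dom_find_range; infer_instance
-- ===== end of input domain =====

-- B computes only the final loop iteration (i = rango) directly, with a set for membership,
-- instead of A's loop that rebuilds and discards the whole result rango+1 times (faster in a timing run).

-- ===== PORT A =====
def find_range (lista : List Int) (rango : Int) : List Int :=
  if lista.length == 0 then []
  else
    ((PySem.List.pyRange 0 (rango + 1) 1).foldl
      (fun _ i =>
        let x := lista.map (fun x => PySem.List.pyRange (x - i) x 1)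
        some (x.flatMap (fun sublist => sublist.filter (fun item => !lista.contains item))))
      none).getD []

-- ===== PORT B =====
def find_range_alt (lista : List Int) (rango : Int) : List Int :=
  let presentes : PySem.Set Int := PySem.Set.ofList lista
  lista.flatMap (fun x =>
    (PySem.List.pyRange (x - rango) x 1).filter (fun y => !(PySem.Set.contains presentes y)))

-- ===== PRECONDITION & SPEC =====
-- Pre_ excludes non-empty lista with rango < 0: there A's loop body never runs and A raises NameError
-- (flat_list is never assigned), so A returns no value on those inputs.
def Pre_find_range (lista : List Int) (rango : Int) : Prop := lista = [] ∨ 0 ≤ rango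
instance (lista : List Int) (rango : Int) : Decidable (Pre_find_range lista rango) := by unfold Pre_find_range; infer_instance
def pvWitness_find_range : List Int × Int := ([1, 3], 1)

def Spec_find_range (lista : List Int) (rango : Int) (out : List Int) : Prop := out = find_range_alt lista rango
instance (lista : List Int) (rango : Int) (out : List Int) : Decidable (Spec_find_range lista rango out) := by unfold Spec_find_range; infer_instance

-- ===== CLAIM (what is proved, stated in full; the proofs are below) =====
def Claim_equal_find_range : Prop := ∀ (lista : List Int) (rango : Int), Dom_find_range lista rango → Pre_find_range lista rango → Spec_find_range lista rango (find_range lista rango)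

-- ===== LEMMAS AND PROOFS =====
theorem contains_ofList (lista : List Int) (y : Int) :
    PySem.Set.contains (PySem.Set.ofList lista) y = lista.contains y := by
  simp [PySem.Set.contains, PySem.Set.mem_ofList]

-- ===== VERDICT (by name: the statement is the Claim_ definition above) =====
theorem find_range_spec : Claim_equal_find_range := by
  intro lista rango _ hpre
  unfold Spec_find_range find_range find_range_alt
  by_cases hl : lista = []
  · subst hl; rfl
  · have h0 : 0 ≤ rango := by
      rcases hpre with h | h
      · exact absurd h hl
      · exact h
    have hne : (lista.length == 0) = false := by
      simp [List.length_eq_zero_iff, hl]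
    rw [if_neg (by simp [hne])]
    rw [PySem.List.pyRange_one_succ_right (by omega : (0:Int) ≤ rango)]
    rw [List.foldl_append]
    simp only [List.foldl_cons, List.foldl_nil, Option.getD_some]
    rw [List.flatMap_map]
    refine List.flatMap_congr ?_
    intro x _
    refine List.filter_congr ?_
    intro y _
    rw [contains_ofList]
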